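-- pv_equiv track=rewrite | github.com/brandonm-simon/fizzbuzz | fizzbuzz/helpers.py | transform3
-- ===== SOURCE A (Python) =====
-- def transform3(row):
--     """
--     Given an input row, transforms data with transformation logic 1
--     Returns a new list of transformed values
--     """
--     # Initialize variables
--     fizz = 0
--     buzz = 0
--     fizzbuzz = 0
--     lucky = 0
--     integer = 0
--
--     # Iterate over elements in row and count each keyword
--     for i in row:
--         if i == 'fizz':
--             fizz += 1
--
--         elif i == 'buzz':
--             buzz += 1
--
--         elif i == 'fizzbuzz':
--             fizzbuzz += 1
--
--         elif i == 'lucky':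
--             lucky +=1
--
--         else:
--             integer += 1
--
--     # Contruct report
--     report = {
--         'fizz': fizz,
--         'buzz': buzz,
--         'fizzbuzz': fizzbuzz,
--         'lucky': lucky,
--         'integer': integer
--     }
--
--     # Return report
--     return report
-- ===== SOURCE B (Python) =====
-- def transform3(row):
--     fizz = row.count('fizz')
--     buzz = row.count('buzz')
--     fizzbuzz = row.count('fizzbuzz')
--     lucky = row.count('lucky')
--     return {
--         'fizz': fizz,
--         'buzz': buzz,
--         'fizzbuzz': fizzbuzz,
--         'lucky': lucky,
--         'integer': len(row) - fizz - buzz - fizzbuzz - lucky,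
--     }
-- ===== Notes on version B (the rewrite author's own statement) =====
-- stated objective: idiomatic
-- what changed: Replaces the single branching counter loop with per-keyword list.count scans and recovers the catch-all count as len(row) minus the keyword counts.
import Mathlib
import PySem

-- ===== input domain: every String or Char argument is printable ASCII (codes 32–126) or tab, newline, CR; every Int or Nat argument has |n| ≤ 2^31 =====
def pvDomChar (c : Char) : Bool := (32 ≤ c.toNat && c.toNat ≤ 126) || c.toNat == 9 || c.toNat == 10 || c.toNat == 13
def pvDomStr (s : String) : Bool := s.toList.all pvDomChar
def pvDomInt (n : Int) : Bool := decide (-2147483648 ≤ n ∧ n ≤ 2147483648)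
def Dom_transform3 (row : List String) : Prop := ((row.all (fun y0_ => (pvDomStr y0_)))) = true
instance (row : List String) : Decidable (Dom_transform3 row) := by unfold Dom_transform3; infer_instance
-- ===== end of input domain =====

-- B replaces A's single branching counter loop by per-keyword count scans plus a
-- length-subtraction for the catch-all (idiomatic; same return value).
-- ===== PORT A =====
-- one iteration of A's loop: the if/elif chain over the five counters
def transform3Step (s : Int × Int × Int × Int × Int) (i : String) :
    Int × Int × Int × Int × Int :=
  if i == "fizz" then (s.1 + 1, s.2.1, s.2.2.1, s.2.2.2.1, s.2.2.2.2)
  else if i == "buzz" then (s.1, s.2.1 + 1, s.2.2.1, s.2.2.2.1, s.2.2.2.2)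
  else if i == "fizzbuzz" then (s.1, s.2.1, s.2.2.1 + 1, s.2.2.2.1, s.2.2.2.2)
  else if i == "lucky" then (s.1, s.2.1, s.2.2.1, s.2.2.2.1 + 1, s.2.2.2.2)
  else (s.1, s.2.1, s.2.2.1, s.2.2.2.1, s.2.2.2.2 + 1)

def transform3 (row : List String) : List (String × Int) :=
  let st := row.foldl transform3Step (0, 0, 0, 0, 0)
  [("fizz", st.1), ("buzz", st.2.1), ("fizzbuzz", st.2.2.1),
   ("lucky", st.2.2.2.1), ("integer", st.2.2.2.2)]

-- ===== PORT B =====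
def transform3_alt (row : List String) : List (String × Int) :=
  let fizz : Int := PySem.List.count row "fizz"
  let buzz : Int := PySem.List.count row "buzz"
  let fizzbuzz : Int := PySem.List.count row "fizzbuzz"
  let lucky : Int := PySem.List.count row "lucky"
  [("fizz", fizz), ("buzz", buzz), ("fizzbuzz", fizzbuzz), ("lucky", lucky),
   ("integer", (row.length : Int) - fizz - buzz - fizzbuzz - lucky)]

-- ===== PRECONDITION & SPEC =====
def Spec_transform3 (row : List String) (out : List (String × Int)) : Prop := out = transform3_alt row
instance (row : List String) (out : List (String × Int)) : Decidable (Spec_transform3 row out) := by unfold Spec_transform3; infer_instance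

-- ===== CLAIM (what is proved, stated in full; the proofs are below) =====
def Claim_equal_transform3 : Prop := ∀ (row : List String), Dom_transform3 row → Spec_transform3 row (transform3 row)

-- ===== LEMMAS AND PROOFS =====

-- ===== VERDICT (by name: the statement is the Claim_ definition above) =====
-- The loop invariant: A's fold state is the four keyword counts plus the count of the rest.
lemma transform3_fold_inv (row : List String) (s : Int × Int × Int × Int × Int) :
    row.foldl transform3Step s
    = (s.1 + row.count "fizz", s.2.1 + row.count "buzz", s.2.2.1 + row.count "fizzbuzz",
       s.2.2.2.1 + row.count "lucky",
       s.2.2.2.2 + (row.length : Int) - row.count "fizz" - row.count "buzz"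
         - row.count "fizzbuzz" - row.count "lucky") := by
  induction row generalizing s with
  | nil => simp
  | cons h t ih =>
    rw [List.foldl_cons, ih]
    simp only [transform3Step, List.count_cons, List.length_cons]
    split_ifs <;> simp_all [Prod.ext_iff] <;> omega

theorem transform3_spec : Claim_equal_transform3 := by
  intro row _
  unfold Spec_transform3 transform3 transform3_alt
  simp only [transform3_fold_inv, PySem.List.count_eq]
  norm_num
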